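-- pv_equiv track=rewrite | github.com/Sapdotten/labs_isb | lab_1/main.py | get_reshuffle
-- ===== SOURCE A (Python) =====
-- def get_reshuffle(key: str) -> list[int]:
--     """
--     Returns a sequense of columns for ensoding by key
--     :param key: key for encoding
--     :return: sequense of columns
--     """
--     key = "".join(c for c in key if c not in r'!./,?"\| ')
--     key_dict = {}
--     for i, letter in enumerate(key):
--         key_dict[i] = letter
--     sort_list = list(key_dict.keys())
--     sort_list = sorted(sort_list, key=lambda k: key_dict[k])
--     return sort_list
-- ===== SOURCE B (Python) =====
-- def get_reshuffle(key: str) -> list[int]: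
--     """Group positions by character, then emit buckets in sorted-character order."""
--     filtered = [c for c in key if c not in r'!./,?"\| ']
--     buckets = {}
--     for i, c in enumerate(filtered):
--         buckets.setdefault(c, []).append(i)
--     result = []
--     for c in sorted(buckets):
--         result.extend(buckets[c])
--     return result
-- ===== Notes on version B (the rewrite author's own statement) =====
-- stated objective: faster
-- what changed: Replaced the index-dict + stable key-lookup sort of indices by a group-by-character index table filled left-to-right and emitted in sorted-character order (bucket-sort style, only the distinct characters get sorted).
import Mathlib
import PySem

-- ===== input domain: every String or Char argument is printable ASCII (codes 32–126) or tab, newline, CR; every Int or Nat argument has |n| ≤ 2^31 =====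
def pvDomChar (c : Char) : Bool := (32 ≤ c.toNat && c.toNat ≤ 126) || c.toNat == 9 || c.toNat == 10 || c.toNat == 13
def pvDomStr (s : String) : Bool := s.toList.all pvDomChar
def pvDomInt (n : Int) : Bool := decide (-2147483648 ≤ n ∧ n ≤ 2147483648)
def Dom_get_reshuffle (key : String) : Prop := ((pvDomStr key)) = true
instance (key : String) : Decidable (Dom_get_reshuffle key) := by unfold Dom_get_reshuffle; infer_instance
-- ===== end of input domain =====

-- B groups the filtered key's positions by character into a dict filled left-to-right and emits
-- the buckets in sorted-character order, instead of A's stable key-lookup sort of the index list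
-- (objective: alternative algorithm, same return value).

-- ===== PORT A =====
-- the characters of r'!./,?"\| ' (shared filter step of both Pythons)
def pvForbidden : List Char := ['!', '.', '/', ',', '?', '"', '\\', '|', ' ']

def get_reshuffle (key : String) : List Int :=
  let ks : List Char := key.toList.filter (fun c => !(pvForbidden.contains c))
  let key_dict : PySem.Dict Int Char :=
    (PySem.List.enumerate ks).foldl (fun d p => d.insert p.1 p.2) PySem.Dict.empty
  let sort_list : List Int := key_dict.keys
  -- key=lambda k: key_dict[k]: the lookup always succeeds (every k is a key of key_dict),
  -- so getD with a dummy default is exact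
  PySem.List.sorted sort_list (fun k => key_dict.getD k ' ') false

-- ===== PORT B =====
def get_reshuffle_alt (key : String) : List Int :=
  let filtered : List Char := key.toList.filter (fun c => !(pvForbidden.contains c))
  -- buckets.setdefault(c, []).append(i): insert-if-absent, then extend the bucket in place
  let buckets : PySem.Dict Char (List Int) :=
    (PySem.List.enumerate filtered).foldl
      (fun d p => (d.setdefault p.2 []).modify p.2 [] (fun l => l ++ [p.1])) PySem.Dict.empty
  (PySem.List.sorted buckets.keys (fun c => c) false).foldl
    (fun acc c => acc ++ buckets.getD c []) []

-- ===== PRECONDITION & SPEC =====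
def Spec_get_reshuffle (key : String) (out : List Int) : Prop := out = get_reshuffle_alt key
instance (key : String) (out : List Int) : Decidable (Spec_get_reshuffle key out) := by unfold Spec_get_reshuffle; infer_instance

-- ===== CLAIM (what is proved, stated in full; the proofs are below) =====
def Claim_equal_get_reshuffle : Prop := ∀ (key : String), Dom_get_reshuffle key → Spec_get_reshuffle key (get_reshuffle key)

-- ===== LEMMAS AND PROOFS =====

-- A's dict building loop, as a function of the filtered character list
def pvDA (fs : List Char) : PySem.Dict Int Char :=
  (PySem.List.enumerate fs).foldl (fun d p => d.insert p.1 p.2) PySem.Dict.empty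

-- B's bucket building loop, as a function of the filtered character list
def pvDB (fs : List Char) : PySem.Dict Char (List Int) :=
  (PySem.List.enumerate fs).foldl
    (fun d p => (d.setdefault p.2 []).modify p.2 [] (fun l => l ++ [p.1])) PySem.Dict.empty

-- setdefault-then-append equals one overwriting insert of the extended bucket
theorem pv_setdefault_append (d : PySem.Dict Char (List Int)) (c : Char) (i : Int) :
    (d.setdefault c []).modify c [] (fun l => l ++ [i]) = d.insert c (d.getD c [] ++ [i]) := by
  by_cases hc : d.contains c = true
  · rw [PySem.Dict.setdefault_of_contains _ _ hc]
    rfl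
  · have hc' : d.contains c = false := by
      cases h : d.contains c
      · rfl
      · exact absurd h hc
    rw [PySem.Dict.setdefault_of_not_contains _ _ hc']
    unfold PySem.Dict.modify
    rw [PySem.Dict.getD_insert_self, PySem.Dict.insert_insert_self,
      PySem.Dict.getD_of_not_contains _ _ hc']

theorem pv_enumerate_snoc {α : Type} (fs : List α) (x : α) (s : Int) :
    PySem.List.enumerate (fs ++ [x]) s
      = PySem.List.enumerate fs s ++ [(s + fs.length, x)] := by
  induction fs generalizing s with
  | nil => simp [PySem.List.enumerate_cons, PySem.List.enumerate_nil]
  | cons a t ih =>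
      simp [PySem.List.enumerate_cons, ih (s + 1)]
      ring_nf

theorem pv_insertBy_skip {α : Type} (before : α → α → Bool) (x : α) (ys zs : List α)
    (h : ∀ y ∈ ys, before x y = false) :
    PySem.List.insertBy before x (ys ++ zs) = ys ++ PySem.List.insertBy before x zs := by
  induction ys with
  | nil => simp
  | cons y t ih =>
      have hy : before x y = false := h y (by simp)
      simp [PySem.List.insertBy, hy, ih (fun z hz => h z (by simp [hz]))]

theorem pv_insertBy_all {α : Type} (before : α → α → Bool) (x : α) (zs : List α)
    (h : ∀ y ∈ zs, before x y = true) :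
    PySem.List.insertBy before x zs = x :: zs := by
  cases zs with
  | nil => simp [PySem.List.insertBy]
  | cons y t => simp [PySem.List.insertBy, h y (by simp)]

theorem pv_stable_sort_buckets {α κ : Type} [LinearOrder κ] [BEq κ] [LawfulBEq κ]
    (xs : List α) (key : α → κ) :
    PySem.List.sorted xs key false
      = (PySem.List.sorted (PySem.Set.ofList (xs.map key)) (fun c => c) false).flatMap
          (fun c => xs.filter (fun x => decide (key x = c))) := by
  induction xs using List.reverseRecOn with
  | nil => rfl
  | append_singleton xs x ih =>
      set k := key x with hkdef
      set f : κ → List α := fun c => xs.filter (fun y => decide (key y = c)) with hf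
      set T := PySem.List.sorted (PySem.Set.ofList ((xs ++ [x]).map key)) (fun c => c) false with hTdef
      have hmapapp : (xs ++ [x]).map key = xs.map key ++ [k] := by
        simp
        exact hkdef.symm
      have hmemT : k ∈ T := by
        rw [hTdef, PySem.List.mem_sorted, PySem.Set.mem_ofList, hmapapp]
        simp
      obtain ⟨TL, TR, hT⟩ := List.append_of_mem hmemT
      have hpwT : T.Pairwise (· < ·) := PySem.List.sorted_ofList_pairwise_lt _
      rw [hT] at hpwT
      have hTLk : ∀ y ∈ TL, y < k := by
        intro y hy
        exact (List.pairwise_append.mp hpwT).2.2 y hy k (by simp)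
      have hTRk : ∀ y ∈ TR, k < y := by
        intro y hy
        exact (List.pairwise_cons.mp (List.pairwise_append.mp hpwT).2.1).1 y hy
      -- membership of T's pieces
      have hmemT' : ∀ a, a ∈ TL ++ k :: TR ↔ a ∈ xs.map key ∨ a = k := by
        intro a
        rw [← hT, hTdef, PySem.List.mem_sorted, PySem.Set.mem_ofList, hmapapp]
        simp
      -- LHS: insertion into the sorted prefix
      have hL : PySem.List.sorted (xs ++ [x]) key false
          = PySem.List.insertBy (fun a b => decide (key a < key b)) x
              (PySem.List.sorted xs key false) := by
        rw [PySem.List.sorted_eq_foldl_insertBy, PySem.List.sorted_eq_foldl_insertBy,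
          List.foldl_append]
        rfl
      -- common shape of the sorted prefix: TL-buckets ++ f k ++ TR-buckets
      have hmid : PySem.List.sorted xs key false
          = TL.flatMap f ++ (f k ++ TR.flatMap f) := by
        by_cases hk : k ∈ xs.map key
        · have hS : PySem.Set.ofList (xs.map key) = PySem.Set.ofList ((xs ++ [x]).map key) := by
            rw [hmapapp]
            have h1 : PySem.Set.ofList (xs.map key ++ [k])
                = PySem.Set.add (PySem.Set.ofList (xs.map key)) k := by
              unfold PySem.Set.ofList
              rw [List.foldl_append]
              rfl
            have h2 : (PySem.Set.ofList (xs.map key)).contains k = true :=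
              List.elem_eq_true_of_mem ((PySem.Set.mem_ofList _ _).mpr hk)
            rw [h1]
            unfold PySem.Set.add
            rw [if_pos h2]
          rw [ih, hS, ← hTdef, hT]
          simp
        · have hfk : f k = [] := by
            rw [hf]
            simp only [List.filter_eq_nil_iff]
            intro y hy hkey
            exact hk (by simpa using ⟨y, hy, by simpa using hkey⟩)
          have hnodupT : (TL ++ k :: TR).Nodup := hpwT.nodup
          have hS2 : PySem.List.sorted (PySem.Set.ofList (xs.map key)) (fun c => c) false
              = TL ++ TR := by
            apply PySem.List.sorted_eq_of_perm_of_pairwise_lt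
            · rw [List.perm_ext_iff_of_nodup
                (hnodupT.sublist (List.Sublist.append_left (List.sublist_cons_self k TR) TL))
                (PySem.Set.nodup_ofList _)]
              intro a
              rw [PySem.Set.mem_ofList]
              constructor
              · intro ha
                rcases List.mem_append.mp ha with h1 | h1
                · rcases (hmemT' a).mp (by simp [h1]) with h2 | h2
                  · exact h2
                  · exact absurd (h2 ▸ hTLk a h1) (lt_irrefl k)
                · rcases (hmemT' a).mp (by simp [h1]) with h2 | h2
                  · exact h2
                  · exact absurd (h2 ▸ hTRk a h1) (lt_irrefl k)
              · intro ha
                rcases (hmemT' a).mpr (Or.inl ha) |> List.mem_append.mp with h1 | h1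
                · exact List.mem_append.mpr (Or.inl h1)
                · rcases List.mem_cons.mp h1 with h2 | h2
                  · exact absurd (h2 ▸ ha) hk
                  · exact List.mem_append.mpr (Or.inr h2)
            · rw [List.pairwise_append]
              refine ⟨(List.pairwise_append.mp hpwT).1,
                (List.pairwise_cons.mp (List.pairwise_append.mp hpwT).2.1).2, ?_⟩
              intro a ha b hb
              exact lt_trans (hTLk a ha) (hTRk b hb)
          rw [ih, hS2, hfk]
          simp
      -- skip over the ≤ k part, land in front of the > k part
      have hkey_TLf : ∀ y ∈ TL.flatMap f ++ f k, (decide (key x < key y)) = false := by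
        intro y hy
        rcases List.mem_append.mp hy with h1 | h1
        · obtain ⟨c, hc, hyc⟩ := List.mem_flatMap.mp h1
          have : key y = c := by
            have := List.of_mem_filter hyc
            simpa using this
          simp only [decide_eq_false_iff_not, not_lt, ← hkdef, this]
          exact le_of_lt (hTLk c hc)
        · have : key y = k := by
            have := List.of_mem_filter h1
            simpa using this
          simp [← hkdef, this]
      have hkey_TRf : ∀ y ∈ TR.flatMap f, (decide (key x < key y)) = true := by
        intro y hy
        obtain ⟨c, hc, hyc⟩ := List.mem_flatMap.mp hy
        have : key y = c := by
          have := List.of_mem_filter hyc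
          simpa using this
        simp only [decide_eq_true_eq, ← hkdef, this]
        exact hTRk c hc
      -- finish
      rw [hL, hmid, ← List.append_assoc,
        pv_insertBy_skip _ _ _ _ hkey_TLf, pv_insertBy_all _ _ _ hkey_TRf]
      -- RHS
      rw [hT]
      have hfl : ∀ (L : List κ), (∀ c ∈ L, c ≠ k) →
          L.flatMap (fun c => (xs ++ [x]).filter (fun y => decide (key y = c))) = L.flatMap f := by
        intro L hL'
        apply List.flatMap_congr
        intro c hc
        rw [List.filter_append]
        have hxc : (decide (key x = c)) = false := by
          simp only [decide_eq_false_iff_not, ← hkdef]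
          exact fun he => (hL' c hc) he.symm
        simp [hxc, hf]
      have hTLne : ∀ c ∈ TL, c ≠ k := fun c hc => ne_of_lt (hTLk c hc)
      have hTRne : ∀ c ∈ TR, c ≠ k := fun c hc => (ne_of_lt (hTRk c hc)).symm
      rw [List.flatMap_append, List.flatMap_cons, hfl TL hTLne, hfl TR hTRne]
      have hfk' : (xs ++ [x]).filter (fun y => decide (key y = k)) = f k ++ [x] := by
        rw [List.filter_append, hf]
        simp [← hkdef]
      rw [hfk']
      simp

theorem pv_items_pvDA (fs : List Char) :
    (pvDA fs).items = PySem.List.enumerate fs 0 := by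
  induction fs using List.reverseRecOn with
  | nil => rfl
  | append_singleton t x ih =>
      have hstep : pvDA (t ++ [x]) = (pvDA t).insert (t.length : Int) x := by
        unfold pvDA
        rw [pv_enumerate_snoc, List.foldl_append]
        simp
      have hkeys : (pvDA t).keys = PySem.List.pyRange 0 (0 + (t.length : Int)) 1 := by
        unfold PySem.Dict.keys
        rw [ih, PySem.List.map_fst_enumerate]
      have hk : (pvDA t).contains (t.length : Int) = false := by
        rw [PySem.Dict.contains_eq_decide_mem_keys, hkeys]
        simp [PySem.List.mem_pyRange_one]
      rw [hstep, PySem.Dict.items_insert_of_not_contains _ _ hk, ih, pv_enumerate_snoc]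
      simp

theorem pv_mk_getD_map (ps : List (Int × Char)) (h : (ps.map Prod.fst).Nodup) :
    (ps.map Prod.fst).map (fun k => (PySem.Dict.mk ps).getD k ' ') = ps.map Prod.snd := by
  induction ps with
  | nil => rfl
  | cons p rest ih =>
      obtain ⟨k, v⟩ := p
      simp only [List.map_cons, List.nodup_cons] at h ⊢
      refine List.cons_eq_cons.mpr ⟨?_, ?_⟩
      · simp [PySem.Dict.getD, PySem.Dict.get?_mk_cons]
      · rw [← ih h.2]
        apply List.map_congr_left
        intro k' hk'
        have hne : k ≠ k' := fun he => h.1 (he ▸ hk')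
        simp [PySem.Dict.getD, PySem.Dict.get?_mk_cons, hne]

theorem pv_mk_filter (ps : List (Int × Char)) (h : (ps.map Prod.fst).Nodup) (c : Char) :
    (ps.map Prod.fst).filter (fun k => decide ((PySem.Dict.mk ps).getD k ' ' = c))
      = (ps.filter (fun p => decide (p.2 = c))).map Prod.fst := by
  induction ps with
  | nil => rfl
  | cons p rest ih =>
      obtain ⟨k, v⟩ := p
      simp only [List.map_cons, List.nodup_cons] at h
      simp only [List.map_cons, List.filter_cons]
      have hrest : (List.map Prod.fst rest).filter
          (fun k' => decide ((PySem.Dict.mk ((k, v) :: rest)).getD k' ' ' = c))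
          = (List.map Prod.fst rest).filter
          (fun k' => decide ((PySem.Dict.mk rest).getD k' ' ' = c)) := by
        apply List.filter_congr
        intro k' hk'
        have hne : k ≠ k' := fun he => h.1 (he ▸ hk')
        simp [PySem.Dict.getD, PySem.Dict.get?_mk_cons, hne]
      have hhead : (decide ((PySem.Dict.mk ((k, v) :: rest)).getD k ' ' = c)) = decide (v = c) := by
        simp [PySem.Dict.getD, PySem.Dict.get?_mk_cons]
      rw [hhead, hrest, ih h.2]
      by_cases hv : v = c <;> simp [hv]

theorem pv_pvDB_snoc (t : List Char) (x : Char) :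
    pvDB (t ++ [x]) = (pvDB t).insert x ((pvDB t).getD x [] ++ [(t.length : Int)]) := by
  unfold pvDB
  rw [pv_enumerate_snoc, List.foldl_append]
  simp [pv_setdefault_append]

theorem pv_keys_pvDB (fs : List Char) :
    (pvDB fs).keys = PySem.Set.ofList fs := by
  induction fs using List.reverseRecOn with
  | nil => rfl
  | append_singleton t x ih =>
      rw [pv_pvDB_snoc]
      have hof : PySem.Set.ofList (t ++ [x]) = PySem.Set.add (PySem.Set.ofList t) x := by
        unfold PySem.Set.ofList
        rw [List.foldl_append]
        rfl
      by_cases hc : x ∈ (pvDB t).keys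
      · have h1 : (pvDB t).contains x = true := (PySem.Dict.contains_iff_mem_keys _ _).mpr hc
        rw [PySem.Dict.keys_insert_of_contains _ _ h1, ih, hof]
        have hmem : x ∈ PySem.Set.ofList t := ih ▸ hc
        have hx : x ∈ t := (PySem.Set.mem_ofList t x).mp hmem
        simp [PySem.Set.add, hx]
      · have h1 : (pvDB t).contains x = false := by
          rw [PySem.Dict.contains_eq_decide_mem_keys]; simp [hc]
        rw [PySem.Dict.keys_insert_of_not_contains _ _ h1, ih, hof]
        have hmem : x ∉ PySem.Set.ofList t := ih ▸ hc
        have hx : x ∉ t := fun hm => hmem ((PySem.Set.mem_ofList t x).mpr hm)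
        simp [PySem.Set.add, hx]

theorem pv_getD_pvDB (fs : List Char) (c : Char) :
    (pvDB fs).getD c []
      = ((PySem.List.enumerate fs 0).filter (fun p => decide (p.2 = c))).map Prod.fst := by
  induction fs using List.reverseRecOn with
  | nil => rfl
  | append_singleton t x ih =>
      rw [pv_pvDB_snoc, pv_enumerate_snoc, List.filter_append,
        PySem.Dict.getD_insert]
      by_cases hx : c = x
      · subst hx
        simp [ih]
      · have : ¬ (x = c) := fun he => hx he.symm
        simp [hx, this, ih]

theorem pv_main (fs : List Char) :
    PySem.List.sorted (pvDA fs).keys (fun k => (pvDA fs).getD k ' ') false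
      = (PySem.List.sorted (pvDB fs).keys (fun c => c) false).foldl
        (fun acc c => acc ++ (pvDB fs).getD c []) [] := by
  have hE : (pvDA fs).keys = (PySem.List.enumerate fs 0).map Prod.fst := by
    unfold PySem.Dict.keys
    rw [pv_items_pvDA]
  have hDA : pvDA fs = PySem.Dict.mk (PySem.List.enumerate fs 0) := by
    apply PySem.Dict.ext
    rw [pv_items_pvDA]
  have hnodup : ((PySem.List.enumerate fs 0).map Prod.fst).Nodup := by
    rw [PySem.List.map_fst_enumerate]
    exact PySem.List.nodup_pyRange_one _ _
  rw [PySem.List.foldl_append_eq_flatMap, List.nil_append, hE, hDA,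
    pv_stable_sort_buckets, pv_mk_getD_map _ hnodup, PySem.List.map_snd_enumerate,
    pv_keys_pvDB]
  apply List.flatMap_congr
  intro c _
  rw [pv_mk_filter _ hnodup, pv_getD_pvDB]

-- ===== VERDICT (by name: the statement is the Claim_ definition above) =====
theorem get_reshuffle_spec : Claim_equal_get_reshuffle := by
  intro key _
  unfold Spec_get_reshuffle
  exact pv_main (key.toList.filter (fun c => !(pvForbidden.contains c)))
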